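-- pv_equiv track=rewrite | github.com/danbrn/yatzy | yatzy.py | calculate_two_pair
-- ===== SOURCE A (Python) =====
-- from collections import Counter
--
-- def calculate_two_pair(dice):
--     counts = Counter(dice)
--     score = 0
--     for die in sorted(counts.keys(), reverse=True):
--         if counts[die] >= 2:
--             if score > 0:
--                 return score + 2 * die
--             else:
--                 score = 2 * die
--     return 0
-- ===== SOURCE B (Python) =====
-- def _pair_values(ordered):
--     """Pair values of a descending-sorted dice list, largest first (each value once)."""
--     if len(ordered) < 2:
--         return []
--     x = ordered[0]
--     if x == ordered[1]:
--         return [x] + _pair_values([z for z in ordered[2:] if z != x])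
--     return _pair_values(ordered[1:])
--
-- def calculate_two_pair(dice):
--     ps = _pair_values(sorted(dice, reverse=True))
--     if len(ps) >= 2:
--         return 2 * (ps[0] + ps[1])
--     return 0
-- ===== Notes on version B (the rewrite author's own statement) =====
-- stated objective: alternative
-- what changed: drops the Counter entirely: sorts the dice multiset descending and recursively scans adjacent duplicates to extract pair values (skipping the rest of each run), then takes the first two, instead of A's stateful early-return walk over the descending keys of a frequency table
-- intended difference: on dice containing two or more distinct pair values all of which are <= 0 (impossible for real dice), A's 'score > 0' seen-a-pair flag never fires and A returns 0, while B returns twice the sum of the two largest pair values, which is the intended two-pair score — e.g. on calculate_two_pair([-1, -1, -2, -2]): A returns 0, B returns -6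
import Mathlib
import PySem

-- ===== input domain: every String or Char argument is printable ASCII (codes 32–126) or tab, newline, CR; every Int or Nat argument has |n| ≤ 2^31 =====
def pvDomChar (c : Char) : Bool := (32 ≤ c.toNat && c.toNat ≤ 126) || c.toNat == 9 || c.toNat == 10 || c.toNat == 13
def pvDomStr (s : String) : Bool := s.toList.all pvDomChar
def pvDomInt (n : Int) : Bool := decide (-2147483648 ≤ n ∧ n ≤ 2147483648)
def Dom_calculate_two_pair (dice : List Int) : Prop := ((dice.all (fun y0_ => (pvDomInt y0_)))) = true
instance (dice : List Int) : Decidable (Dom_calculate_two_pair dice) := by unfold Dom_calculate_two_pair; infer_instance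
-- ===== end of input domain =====

-- B drops the Counter: it sorts the dice multiset descending and recursively scans adjacent
-- duplicates to collect pair values, then takes the first two (objective: alternative).

-- ===== PORT A =====
-- the 'for die in sorted(counts.keys(), reverse=True)' loop with its 'score' accumulator and early return
def twoPairLoop (counts : PySem.Dict Int Int) : List Int → Int → Int
  | [], _ => 0
  | die :: rest, score =>
    if counts.getD die 0 ≥ 2 then
      if score > 0 then score + 2 * die
      else twoPairLoop counts rest (2 * die)
    else twoPairLoop counts rest score

def calculate_two_pair (dice : List Int) : Int :=
  let counts := PySem.Dict.counter dice
  twoPairLoop counts (PySem.List.sorted counts.keys (fun x => x) true) 0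

-- ===== PORT B =====
-- _pair_values: pair values of a descending-sorted list, largest first, each value once
-- [z for z in ordered[2:] if z != x]
def dropVal (x : Int) (l : List Int) : List Int := l.filter (fun z => z ≠ x)

theorem dropVal_length_le (x : Int) (l : List Int) : (dropVal x l).length ≤ l.length :=
  List.length_filter_le _ l

def pairValues : List Int → List Int
  | [] => []
  | [_] => []
  | x :: y :: rest =>
    if x = y then x :: pairValues (dropVal x rest)
    else pairValues (y :: rest)
termination_by l => l.length
decreasing_by
  · exact Nat.lt_succ_of_le (Nat.le_succ_of_le (dropVal_length_le x rest))
  · simp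

def calculate_two_pair_alt (dice : List Int) : Int :=
  match pairValues (PySem.List.sorted dice (fun x => x) true) with
  | a :: b :: _ => 2 * (a + b)   -- len(ps) >= 2: 2 * (ps[0] + ps[1])
  | _ => 0

-- ===== PRECONDITION & SPEC =====
-- On dice with at least two distinct pair values all of which are ≤ 0, A's 'score > 0' flag never
-- fires and A returns 0, while B returns twice the sum of the two largest pair values — the intended
-- two-pair score (real dice are 1..6, where A and B agree).
def D_calculate_two_pair (dice : List Int) : Prop :=
  (∃ a ∈ dice, ∃ b ∈ dice, a ≠ b ∧ 2 ≤ dice.count a ∧ 2 ≤ dice.count b) ∧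
  (∀ v ∈ dice, 2 ≤ dice.count v → v ≤ 0)
instance (dice : List Int) : Decidable (D_calculate_two_pair dice) := by
  unfold D_calculate_two_pair; infer_instance

def Spec_calculate_two_pair (dice : List Int) (out : Int) : Prop :=
  ¬ D_calculate_two_pair dice → out = calculate_two_pair_alt dice
instance (dice : List Int) (out : Int) : Decidable (Spec_calculate_two_pair dice out) := by
  unfold Spec_calculate_two_pair; infer_instance

def pvDiffWitness_calculate_two_pair : List Int := [-1, -1, -2, -2]
def pvDiffWitnessOut_calculate_two_pair : Int × Int := (0, -6)

-- ===== CLAIM (what is proved, stated in full; the proofs are below) =====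
def Claim_unchanged_calculate_two_pair : Prop := ∀ (dice : List Int), Dom_calculate_two_pair dice → Spec_calculate_two_pair dice (calculate_two_pair dice)
def Claim_changed_calculate_two_pair : Prop := Dom_calculate_two_pair (pvDiffWitness_calculate_two_pair) ∧ D_calculate_two_pair (pvDiffWitness_calculate_two_pair) ∧ calculate_two_pair (pvDiffWitness_calculate_two_pair) = pvDiffWitnessOut_calculate_two_pair.1 ∧ calculate_two_pair_alt (pvDiffWitness_calculate_two_pair) = pvDiffWitnessOut_calculate_two_pair.2 ∧ pvDiffWitnessOut_calculate_two_pair.1 ≠ pvDiffWitnessOut_calculate_two_pair.2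
def Claim_exact_calculate_two_pair : Prop := ∀ (dice : List Int), Dom_calculate_two_pair dice → D_calculate_two_pair dice → calculate_two_pair dice ≠ calculate_two_pair_alt dice

-- ===== LEMMAS AND PROOFS =====

-- the value both ports compute, as a function of the descending list of pair values
def twoPairSpec (dice : List Int) : Int :=
  match (PySem.List.sorted (PySem.Set.ofList dice) (fun x => x) true).filter
      (fun v => (PySem.Dict.counter dice).getD v 0 ≥ 2) with
  | a :: b :: _ => if 0 < a then 2 * a + 2 * b else 0
  | _ => 0

-- A's loop returns 0 when score ≤ 0 and all remaining dice values are ≤ 0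
theorem twoPairLoop_nonpos (counts : PySem.Dict Int Int) (l : List Int) (s : Int)
    (hs : s ≤ 0) (hl : ∀ v ∈ l, v ≤ 0) : twoPairLoop counts l s = 0 := by
  induction l generalizing s with
  | nil => rfl
  | cons d rest ih =>
    have hd : d ≤ 0 := hl d (by simp)
    have hrest : ∀ v ∈ rest, v ≤ 0 := fun v hv => hl v (by simp [hv])
    simp only [twoPairLoop]
    split_ifs with h1 h2
    · omega
    · exact ih (2 * d) (by omega) hrest
    · exact ih s hs hrest

-- A's loop after the first pair value a was found (score = 2*a), on a strictly descending tail
theorem twoPairLoop_found (counts : PySem.Dict Int Int) (l : List Int) (a : Int)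
    (hlt : ∀ v ∈ l, v < a) (hp : l.Pairwise (· > ·)) :
    twoPairLoop counts l (2 * a) =
      match l.filter (fun v => counts.getD v 0 ≥ 2) with
      | b :: _ => if 0 < a then 2 * a + 2 * b else 0
      | [] => 0 := by
  induction l with
  | nil => rfl
  | cons d rest ih =>
    have hd : d < a := hlt d (by simp)
    have hrest : ∀ v ∈ rest, v < a := fun v hv => hlt v (by simp [hv])
    have hrd : ∀ v ∈ rest, v < d := fun v hv => (List.pairwise_cons.mp hp).1 v hv
    simp only [twoPairLoop]
    by_cases hc : counts.getD d 0 ≥ 2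
    · simp only [hc, if_true, List.filter_cons, decide_eq_true_eq, ge_iff_le]
      by_cases ha : 0 < a
      · simp [show (0:Int) < 2 * a by omega, ha]
      · have h2a : ¬ ((0:Int) < 2 * a) := by omega
        simp only [h2a, if_false]
        rw [twoPairLoop_nonpos counts rest (2 * d) (by omega)
          (fun v hv => le_of_lt (lt_of_lt_of_le (hrd v hv) (by omega)))]
        simp [ha]
    · rw [if_neg hc, ih hrest (List.pairwise_cons.mp hp).2]
      simp [hc]

-- A's loop from score 0 on a strictly descending list
theorem twoPairLoop_zero (counts : PySem.Dict Int Int) (l : List Int)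
    (hp : l.Pairwise (· > ·)) :
    twoPairLoop counts l 0 =
      match l.filter (fun v => counts.getD v 0 ≥ 2) with
      | a :: b :: _ => if 0 < a then 2 * a + 2 * b else 0
      | _ => 0 := by
  induction l with
  | nil => rfl
  | cons d rest ih =>
    have hrd : ∀ v ∈ rest, v < d := fun v hv => (List.pairwise_cons.mp hp).1 v hv
    have htl : rest.Pairwise (· > ·) := (List.pairwise_cons.mp hp).2
    simp only [twoPairLoop]
    by_cases hc : counts.getD d 0 ≥ 2
    · simp only [hc, if_true, lt_irrefl, if_false, List.filter_cons, decide_eq_true_eq,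
        ge_iff_le]
      rw [twoPairLoop_found counts rest d hrd htl]
      cases rest.filter (fun v => counts.getD v 0 ≥ 2) <;> rfl
    · rw [if_neg hc, ih htl]
      simp [hc]

-- the descending key list of Counter(dice) is strictly decreasing
theorem sorted_keys_pairwise_gt (dice : List Int) :
    (PySem.List.sorted (PySem.Set.ofList dice) (fun x => x) true).Pairwise (· > ·) := by
  have hge := PySem.List.sorted_pairwise_rev (PySem.Set.ofList dice) (fun x => x)
  have hnd : (PySem.List.sorted (PySem.Set.ofList dice) (fun x => x) true).Nodup :=
    (PySem.List.sorted_perm (PySem.Set.ofList dice) (fun x => x) true).nodup_iff.mpr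
      (PySem.Set.nodup_ofList dice)
  have := List.Pairwise.and hge hnd
  exact this.imp (fun {a b} h => lt_of_le_of_ne h.1 (Ne.symm h.2))

-- A computes twoPairSpec
theorem portA_eq_spec (dice : List Int) : calculate_two_pair dice = twoPairSpec dice := by
  unfold calculate_two_pair twoPairSpec
  simp only [PySem.Dict.keys_counter]
  exact twoPairLoop_zero _ _ (sorted_keys_pairwise_gt dice)

-- elements of pairValues l are elements of l
theorem pairValues_subset : ∀ (l : List Int), ∀ v ∈ pairValues l, v ∈ l := by
  intro l
  induction l using pairValues.induct with
  | case1 => simp [pairValues]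
  | case2 => simp [pairValues]
  | case3 y rest ih =>
    intro v hv
    simp only [pairValues] at hv
    rcases List.mem_cons.mp hv with h | h
    · simp [h]
    · have h1 := ih v h
      have h2 := List.mem_of_mem_filter h1
      simp [h2]
  | case4 x y rest hxy ih =>
    intro v hv
    simp only [pairValues, if_neg hxy] at hv
    have := ih v hv
    simp at this
    rcases this with h | h <;> simp [h]

-- on a descending-sorted list, pairValues is strictly decreasing and contains exactly the
-- values of multiplicity ≥ 2
theorem pairValues_spec : ∀ (l : List Int), l.Pairwise (· ≥ ·) →
    (pairValues l).Pairwise (· > ·) ∧ ∀ v, v ∈ pairValues l ↔ 2 ≤ l.count v := by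
  intro l
  induction l using pairValues.induct with
  | case1 =>
    intro _
    exact ⟨by simp [pairValues], fun v => by simp [pairValues]⟩
  | case2 z =>
    intro _
    refine ⟨by simp [pairValues], fun v => ?_⟩
    simp only [pairValues, List.count_singleton]
    constructor
    · intro h; simp at h
    · intro h; split at h <;> omega
  | case3 y rest ih =>
    intro hp
    have hrest : rest.Pairwise (· ≥ ·) := (List.pairwise_cons.mp (List.pairwise_cons.mp hp).2).2
    have hfil : (dropVal y rest).Pairwise (· ≥ ·) := hrest.filter _
    obtain ⟨ihp, ihm⟩ := ih hfil
    have hle : ∀ v ∈ rest, v ≤ y := fun v hv => (List.pairwise_cons.mp hp).1 v (by simp [hv])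
    constructor
    · rw [pairValues, if_pos rfl]
      refine List.pairwise_cons.mpr ⟨?_, ihp⟩
      intro v hv
      have hvf := pairValues_subset _ v hv
      have hvm := List.mem_of_mem_filter hvf
      have hvne : v ≠ y := by
        have := List.of_mem_filter hvf; simpa using this
      exact lt_of_le_of_ne (hle v hvm) hvne
    · intro v
      rw [pairValues, if_pos rfl]
      by_cases hvy : v = y
      · subst hvy
        simp only [List.mem_cons, true_or, true_iff, List.count_cons_self]
        omega
      · rw [List.mem_cons]
        simp only [hvy, false_or]
        rw [ihm v]
        have hcf : (dropVal y rest).count v = rest.count v := by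
          unfold dropVal
          rw [List.count_filter]
          simp [hvy]
        rw [hcf]
        simp [Ne.symm hvy]
  | case4 x y rest hxy ih =>
    intro hp
    have htl : (y :: rest).Pairwise (· ≥ ·) := (List.pairwise_cons.mp hp).2
    obtain ⟨ihp, ihm⟩ := ih htl
    have hyx : y ≤ x := (List.pairwise_cons.mp hp).1 y (by simp)
    have hxnot : x ∉ y :: rest := by
      intro hmem
      rcases List.mem_cons.mp hmem with h | h
      · exact hxy h
      · have := (List.pairwise_cons.mp htl).1 x h
        have hylt : y < x := lt_of_le_of_ne hyx (Ne.symm hxy)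
        omega
    refine ⟨by rw [pairValues, if_neg hxy]; exact ihp, fun v => ?_⟩
    rw [pairValues, if_neg hxy, ihm v]
    by_cases hvx : v = x
    · subst hvx
      have hc0 : (y :: rest).count v = 0 := List.count_eq_zero.mpr hxnot
      rw [hc0, List.count_cons_self, hc0]
      omega
    · simp [List.count_cons, Ne.symm hvx]

-- two strictly descending integer lists with the same members are equal
theorem eq_of_pairwise_gt_mem : ∀ (L M : List Int), L.Pairwise (· > ·) → M.Pairwise (· > ·) →
    (∀ v, v ∈ L ↔ v ∈ M) → L = M := by
  intro L
  induction L with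
  | nil =>
    intro M _ _ hm
    cases M with
    | nil => rfl
    | cons b s => exact absurd ((hm b).mpr (by simp)) (by simp)
  | cons a t ih =>
    intro M hL hM hm
    cases M with
    | nil => exact absurd ((hm a).mp (by simp)) (by simp)
    | cons b s =>
      have hab : a = b := by
        have h1 : a ∈ b :: s := (hm a).mp (by simp)
        have h2 : b ∈ a :: t := (hm b).mpr (by simp)
        rcases List.mem_cons.mp h1 with h | h
        · exact h
        · have hba : b > a := (List.pairwise_cons.mp hM).1 a h
          rcases List.mem_cons.mp h2 with h' | h'
          · omega
          · have := (List.pairwise_cons.mp hL).1 b h'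
            omega
      subst hab
      have hat : a ∉ t := fun h => absurd ((List.pairwise_cons.mp hL).1 a h) (by omega)
      have has : a ∉ s := fun h => absurd ((List.pairwise_cons.mp hM).1 a h) (by omega)
      have : t = s := by
        apply ih s (List.pairwise_cons.mp hL).2 (List.pairwise_cons.mp hM).2
        intro v
        constructor
        · intro hv
          have := (hm v).mp (by simp [hv])
          rcases List.mem_cons.mp this with h | h
          · exact absurd (h ▸ hv) hat
          · exact h
        · intro hv
          have := (hm v).mpr (by simp [hv])
          rcases List.mem_cons.mp this with h | h
          · exact absurd (h ▸ hv) has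
          · exact h
      rw [this]

-- membership in the filtered descending key list
theorem mem_filtered_keys (dice : List Int) (v : Int) :
    v ∈ (PySem.List.sorted (PySem.Set.ofList dice) (fun x => x) true).filter
        (fun v => (PySem.Dict.counter dice).getD v 0 ≥ 2) ↔
      v ∈ dice ∧ 2 ≤ dice.count v := by
  rw [List.mem_filter]
  simp only [PySem.List.mem_sorted, PySem.Set.mem_ofList, PySem.Dict.getD_counter,
    ge_iff_le, decide_eq_true_eq]
  constructor <;> rintro ⟨h1, h2⟩ <;> exact ⟨h1, by exact_mod_cast h2⟩

-- the filtered descending key list is strictly decreasing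
theorem filtered_keys_pairwise_gt (dice : List Int) :
    ((PySem.List.sorted (PySem.Set.ofList dice) (fun x => x) true).filter
        (fun v => (PySem.Dict.counter dice).getD v 0 ≥ 2)).Pairwise (· > ·) :=
  ((sorted_keys_pairwise_gt dice).filter _).imp (fun {a b} h => h)

-- B's recursive scan of the sorted dice equals A's filtered descending key list
theorem pairValues_sorted_eq (dice : List Int) :
    pairValues (PySem.List.sorted dice (fun x => x) true) =
      (PySem.List.sorted (PySem.Set.ofList dice) (fun x => x) true).filter
        (fun v => (PySem.Dict.counter dice).getD v 0 ≥ 2) := by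
  have hsort : (PySem.List.sorted dice (fun x => x) true).Pairwise (· ≥ ·) :=
    (PySem.List.sorted_pairwise_rev dice (fun x => x)).imp (fun {a b} h => h)
  obtain ⟨hpw, hmem⟩ := pairValues_spec _ hsort
  apply eq_of_pairwise_gt_mem _ _ hpw (filtered_keys_pairwise_gt dice)
  intro v
  rw [hmem v, mem_filtered_keys]
  have hcnt : (PySem.List.sorted dice (fun x => x) true).count v = dice.count v :=
    (PySem.List.sorted_perm dice (fun x => x) true).count_eq v
  rw [hcnt]
  constructor
  · intro h
    exact ⟨List.count_pos_iff.mp (by omega), h⟩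
  · exact fun h => h.2

theorem calculate_two_pair_spec' (dice : List Int) (h : ¬ D_calculate_two_pair dice) :
    calculate_two_pair dice = calculate_two_pair_alt dice := by
  rw [portA_eq_spec]
  unfold twoPairSpec calculate_two_pair_alt
  rw [pairValues_sorted_eq]
  have hpw := filtered_keys_pairwise_gt dice
  have hmem := mem_filtered_keys dice
  generalize hE : (PySem.List.sorted (PySem.Set.ofList dice) (fun x => x) true).filter
      (fun v => (PySem.Dict.counter dice).getD v 0 ≥ 2) = L at hpw hmem ⊢
  cases L with
  | nil => rfl
  | cons a t =>
    cases t with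
    | nil => rfl
    | cons b rest =>
      have hane : a ≠ b := by
        have := (List.pairwise_cons.mp hpw).1 b (by simp)
        omega
      have hma : a ∈ dice ∧ 2 ≤ dice.count a := (hmem a).mp (by simp)
      have hmb : b ∈ dice ∧ 2 ≤ dice.count b := (hmem b).mp (by simp)
      have hQ : ¬ ∀ v ∈ dice, 2 ≤ dice.count v → v ≤ 0 := by
        intro hq
        exact h ⟨⟨a, hma.1, b, hmb.1, hane, hma.2, hmb.2⟩, hq⟩
      push Not at hQ
      obtain ⟨v, hv, hvc, hvpos⟩ := hQ
      have hvL : v ∈ a :: b :: rest := (hmem v).mpr ⟨hv, hvc⟩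
      have hav : v ≤ a := by
        rcases List.mem_cons.mp hvL with h1 | h1
        · omega
        · have := (List.pairwise_cons.mp hpw).1 v h1
          omega
      have hapos : 0 < a := by omega
      simp only [hapos, if_true]
      ring

-- ===== VERDICT (by name: the statement is the Claim_ definition above) =====
theorem calculate_two_pair_spec : Claim_unchanged_calculate_two_pair := by
  intro dice _ hD
  exact calculate_two_pair_spec' dice hD

theorem calculate_two_pair_changed : Claim_changed_calculate_two_pair := by
  unfold Claim_changed_calculate_two_pair
  refine ⟨by decide, by decide, by decide, ?_, by decide⟩
  show calculate_two_pair_alt [-1, -1, -2, -2] = (-6 : Int)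
  have hs : PySem.List.sorted ([-1, -1, -2, -2] : List Int) (fun x => x) true
      = [-1, -1, -2, -2] := by decide
  unfold calculate_two_pair_alt
  rw [hs, pairValues, if_pos rfl, show dropVal (-1) [-2, -2] = [-2, -2] from by decide,
    pairValues, if_pos rfl]
  rfl

theorem calculate_two_pair_tight : Claim_exact_calculate_two_pair := by
  intro dice _ hD
  obtain ⟨⟨a, ha, b, hb, hne, hca, hcb⟩, hQ⟩ := hD
  rw [portA_eq_spec]
  unfold twoPairSpec calculate_two_pair_alt
  rw [pairValues_sorted_eq]
  have hpw := filtered_keys_pairwise_gt dice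
  have hmem := mem_filtered_keys dice
  generalize hE : (PySem.List.sorted (PySem.Set.ofList dice) (fun x => x) true).filter
      (fun v => (PySem.Dict.counter dice).getD v 0 ≥ 2) = L at hpw hmem ⊢
  have haL : a ∈ L := (hmem a).mpr ⟨ha, hca⟩
  have hbL : b ∈ L := (hmem b).mpr ⟨hb, hcb⟩
  cases L with
  | nil => simp at haL
  | cons x t =>
    cases t with
    | nil =>
      simp only [List.mem_singleton] at haL hbL
      exact absurd (haL.trans hbL.symm) hne
    | cons y rest =>
      have hyx : y < x := (List.pairwise_cons.mp hpw).1 y (by simp)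
      have hx0 : x ≤ 0 := by
        have := (hmem x).mp (by simp)
        exact hQ x this.1 this.2
      simp only [show ¬ (0 < x) by omega, if_false]
      intro hcontra
      omega
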